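-- pv_equiv track=rewrite | github.com/Saketh-Reddy-Bejadi/Python | Practice/2124.py | func
-- ===== SOURCE A (Python) =====
-- def func(s):
--     b=False
--     for c in s:
--         if c=='b':
--             b=True
--         if b:
--             if c =='a' :
--                 return False
--     return True
-- ===== SOURCE B (Python) =====
-- def func(s):
--     t = [c for c in s if c in 'ab']
--     return t == sorted(t)
-- ===== Notes on version B (the rewrite author's own statement) =====
-- stated objective: alternative
-- what changed: Instead of a stateful flag loop, B filters the string down to its 'a'/'b' characters and checks that this subsequence is already sorted ('a' < 'b', so sortedness means no 'a' follows a 'b').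
import Mathlib
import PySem

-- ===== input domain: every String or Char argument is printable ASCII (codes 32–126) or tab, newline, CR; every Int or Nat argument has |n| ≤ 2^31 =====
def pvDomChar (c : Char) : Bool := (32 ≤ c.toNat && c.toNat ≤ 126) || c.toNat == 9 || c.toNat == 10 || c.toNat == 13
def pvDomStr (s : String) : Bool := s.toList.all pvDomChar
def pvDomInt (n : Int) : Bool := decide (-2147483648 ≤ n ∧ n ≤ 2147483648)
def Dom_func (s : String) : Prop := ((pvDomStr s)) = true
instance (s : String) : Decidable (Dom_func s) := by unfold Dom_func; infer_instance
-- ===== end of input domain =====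

-- B replaces A's stateful flag loop by: filter the string to its 'a'/'b' characters and
-- check that this subsequence equals its sorted form (sortedness = no 'a' after a 'b').

-- ===== PORT A =====
-- the for-loop of A: state is the flag b; early return False becomes the `false` branch
def funcGo : List Char → Bool → Bool
  | [], _ => true
  | c :: cs, b =>
    let b' := if c = 'b' then true else b
    if b' && decide (c = 'a') then false else funcGo cs b'

def func (s : String) : Bool := funcGo s.toList false

-- ===== PORT B =====
-- `c in 'ab'` for a single char is list membership; `t == sorted(t)` is PySem.List.sorted
def func_alt (s : String) : Bool :=
  let t := s.toList.filter (fun c => ['a', 'b'].contains c)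
  decide (t = PySem.List.sorted t (fun x => x) false)

-- ===== PRECONDITION & SPEC =====
def Spec_func (s : String) (out : Bool) : Prop := out = func_alt s
instance (s : String) (out : Bool) : Decidable (Spec_func s out) := by unfold Spec_func; infer_instance

-- ===== CLAIM (what is proved, stated in full; the proofs are below) =====
def Claim_equal_func : Prop := ∀ (s : String), Dom_func s → Spec_func s (func s)

-- ===== LEMMAS AND PROOFS =====

-- with the flag already set, A scans for an 'a'
lemma funcGo_true (L : List Char) : funcGo L true = !L.contains 'a' := by
  induction L with
  | nil => rfl
  | cons c cs ih =>
    by_cases h : c = 'a'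
    · subst h; simp [funcGo]
    · have h' : ¬('a' = c) := fun hh => h hh.symm
      simp [funcGo, h, h', ih]

-- a list of only 'b's is pairwise ≤
lemma pairwise_of_all_b (L : List Char) (h : ∀ x ∈ L, x = 'b') :
    L.Pairwise (fun a b => a ≤ b) := by
  induction L with
  | nil => exact List.Pairwise.nil
  | cons c cs ih =>
    refine List.Pairwise.cons (fun y hy => ?_) (ih fun x hx => h x (List.mem_cons_of_mem _ hx))
    rw [h c (List.mem_cons_self), h y (List.mem_cons_of_mem _ hy)]

-- A's loop answers exactly "the 'a'/'b' subsequence is nondecreasing"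
lemma funcGo_iff_pairwise (L : List Char) :
    funcGo L false = true ↔ (L.filter (fun c => ['a', 'b'].contains c)).Pairwise (fun a b => a ≤ b) := by
  induction L with
  | nil => simp [funcGo]
  | cons c cs ih =>
    by_cases hb : c = 'b'
    · subst hb
      have hstep : funcGo ('b' :: cs) false = funcGo cs true := by simp [funcGo]
      rw [hstep, funcGo_true]
      constructor
      · intro h
        have hna : ('a' : Char) ∉ cs := by
          simpa [List.contains_eq_mem] using h
        have hfb : (('b' : Char) :: cs).filter (fun c => ['a', 'b'].contains c)
            = 'b' :: cs.filter (fun c => ['a', 'b'].contains c) := by simp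
        rw [hfb]
        have hall : ∀ x ∈ cs.filter (fun c => ['a', 'b'].contains c), x = 'b' := by
          intro x hx
          have hm := List.of_mem_filter hx
          have hmem := List.mem_of_mem_filter hx
          simp only [List.contains_eq_mem, List.mem_cons, List.mem_singleton,
            decide_eq_true_eq, List.not_mem_nil, or_false] at hm
          rcases hm with h1 | h1
          · exact absurd (h1 ▸ hmem) hna
          · exact h1
        exact List.Pairwise.cons
          (fun y hy => by rw [hall y hy]) (pairwise_of_all_b _ hall)
      · intro h
        have hfb : (('b' : Char) :: cs).filter (fun c => ['a', 'b'].contains c)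
            = 'b' :: cs.filter (fun c => ['a', 'b'].contains c) := by simp
        rw [hfb] at h
        have hle : ∀ y ∈ cs.filter (fun c => ['a', 'b'].contains c), ('b' : Char) ≤ y :=
          fun y hy => List.rel_of_pairwise_cons h hy
        simp only [List.contains_eq_mem, Bool.not_eq_true', decide_eq_false_iff_not]
        intro ha
        have : ('a' : Char) ∈ cs.filter (fun c => ['a', 'b'].contains c) :=
          List.mem_filter.mpr ⟨ha, by decide⟩
        exact absurd (hle _ this) (by decide)
    · by_cases ha : c = 'a'
      · subst ha
        have hstep : funcGo ('a' :: cs) false = funcGo cs false := by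
          simp [funcGo]
        rw [hstep, ih]
        have hfa : (('a' : Char) :: cs).filter (fun c => ['a', 'b'].contains c)
            = 'a' :: cs.filter (fun c => ['a', 'b'].contains c) := by simp
        rw [hfa]
        constructor
        · intro h
          refine List.Pairwise.cons (fun y hy => ?_) h
          have hm := List.of_mem_filter hy
          simp only [List.contains_eq_mem, List.mem_cons, List.mem_singleton,
            decide_eq_true_eq, List.not_mem_nil, or_false] at hm
          rcases hm with h1 | h1 <;> rw [h1] <;> decide
        · exact fun h => h.of_cons
      · have hstep : funcGo (c :: cs) false = funcGo cs false := by
          simp [funcGo, hb, ha]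
        have hfc : (c :: cs).filter (fun c => ['a', 'b'].contains c)
            = cs.filter (fun c => ['a', 'b'].contains c) := by
          simp [hb, ha]
        rw [hstep, ih, hfc]

-- t == sorted(t) is exactly pairwise ≤
lemma eq_sorted_iff_pairwise (t : List Char) :
    t = PySem.List.sorted t (fun x => x) false ↔ t.Pairwise (fun a b => a ≤ b) := by
  constructor
  · intro h
    have := PySem.List.sorted_pairwise (xs := t) (key := fun x => x)
    rw [← h] at this
    exact this
  · intro h
    exact (PySem.List.sorted_eq_self_of_pairwise t (fun x => x) h).symm

-- ===== VERDICT (by name: the statement is the Claim_ definition above) =====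
theorem func_spec : Claim_equal_func := by
  intro s _
  unfold Spec_func func func_alt
  rw [Bool.eq_iff_iff]
  simp only [decide_eq_true_eq]
  rw [funcGo_iff_pairwise, eq_sorted_iff_pairwise]
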